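-- pv_equiv track=rewrite | github.com/leejongcheal/algorithm_python | 파이썬 알고리즘 인터뷰/18년도 카카오 코딩테스트/5.뉴스 클러스터링.py | plus_AB
-- ===== SOURCE A (Python) =====
-- def plus_AB(A, B):
--     res = 0
--     a = set(A.keys())
--     b = set(B.keys())
--     plus_ab = a | b
--     for element in plus_ab:
--         if element in a and element in b:
--             res += max(A[element], B[element])
--         elif element in a:
--             res += A[element]
--         else:
--             res += B[element]
--     return res
-- ===== SOURCE B (Python) =====
-- def plus_AB(A, B):
--     total = sum(A.values()) + sum(B.values())
--     common = A.keys() & B.keys()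
--     return total - sum(min(A[k], B[k]) for k in common)
-- ===== Notes on version B (the rewrite author's own statement) =====
-- stated objective: simpler
-- what changed: Replaces the per-key branching loop over the union of keys with the identity max(a,b)=a+b-min(a,b): sum all values of both dicts, then subtract the min on the shared keys.
import Mathlib
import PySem

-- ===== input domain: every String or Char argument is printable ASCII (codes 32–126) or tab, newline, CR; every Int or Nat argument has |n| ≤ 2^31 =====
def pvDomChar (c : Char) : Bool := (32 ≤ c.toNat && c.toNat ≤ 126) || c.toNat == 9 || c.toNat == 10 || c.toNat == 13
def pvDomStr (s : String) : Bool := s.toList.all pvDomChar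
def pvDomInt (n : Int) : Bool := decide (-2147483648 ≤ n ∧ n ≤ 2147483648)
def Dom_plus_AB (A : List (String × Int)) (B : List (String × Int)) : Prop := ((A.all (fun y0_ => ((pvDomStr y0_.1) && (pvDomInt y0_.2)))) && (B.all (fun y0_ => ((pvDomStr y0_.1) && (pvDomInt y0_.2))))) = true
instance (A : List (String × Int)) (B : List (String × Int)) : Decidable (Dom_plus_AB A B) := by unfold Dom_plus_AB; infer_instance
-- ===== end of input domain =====

-- B replaces A's branching loop over the union of keys by the identity max(a,b)=a+b-min(a,b):
-- sum of all values of both dicts minus the min on shared keys (objective: simpler).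

-- ===== PORT A =====
-- literal port of A; the dict arguments arrive as assoc lists, turned into dicts by Dict.ofList.
-- Inside the first branch both keys are present, so `getD _ 0` equals Python's A[element]/B[element];
-- the loop iterates over a set, which is sound here because the accumulated sum is order-independent.
def plus_AB (A : List (String × Int)) (B : List (String × Int)) : Int :=
  let dA := PySem.Dict.ofList A
  let dB := PySem.Dict.ofList B
  let a : PySem.Set String := PySem.Set.ofList dA.keys
  let b : PySem.Set String := PySem.Set.ofList dB.keys
  let plus_ab := PySem.Set.union a b
  plus_ab.foldl (fun res element =>
    if PySem.Set.contains a element && PySem.Set.contains b element then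
      res + max (dA.getD element 0) (dB.getD element 0)
    else if PySem.Set.contains a element then
      res + dA.getD element 0
    else
      res + dB.getD element 0) 0

-- ===== PORT B =====
-- literal port of Source B: total of all values minus the min over the key intersection.
def plus_AB_alt (A : List (String × Int)) (B : List (String × Int)) : Int :=
  let dA := PySem.Dict.ofList A
  let dB := PySem.Dict.ofList B
  let total := dA.values.sum + dB.values.sum
  let common := PySem.Set.inter (PySem.Set.ofList dA.keys) dB.keys
  total - (common.map (fun k => min (dA.getD k 0) (dB.getD k 0))).sum

-- ===== PRECONDITION & SPEC =====
def Spec_plus_AB (A : List (String × Int)) (B : List (String × Int)) (out : Int) : Prop := out = plus_AB_alt A B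
instance (A : List (String × Int)) (B : List (String × Int)) (out : Int) : Decidable (Spec_plus_AB A B out) := by unfold Spec_plus_AB; infer_instance

-- ===== CLAIM (what is proved, stated in full; the proofs are below) =====
def Claim_equal_plus_AB : Prop := ∀ (A : List (String × Int)) (B : List (String × Int)), Dom_plus_AB A B → Spec_plus_AB A B (plus_AB A B)

-- ===== LEMMAS AND PROOFS =====

-- the three-way branching accumulation loop is a sum of a map
theorem pv_foldl_ite (l : List String) (c1 c2 : String → Bool) (f g h : String → Int) (init : Int) :
    l.foldl (fun res e => if c1 e then res + f e else if c2 e then res + g e else res + h e) init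
      = init + (l.map (fun e => if c1 e then f e else if c2 e then g e else h e)).sum := by
  induction l generalizing init with
  | nil => simp
  | cons x xs ih =>
    simp only [List.foldl_cons, List.map_cons, List.sum_cons, ih]
    split_ifs <;> ring

-- splitting a sum with an if into the base sum plus the correction on the filtered part
theorem pv_sum_map_ite (l : List String) (p : String → Bool) (g h : String → Int) :
    (l.map (fun k => if p k then h k else g k)).sum
      = (l.map g).sum + ((l.filter p).map (fun k => h k - g k)).sum := by
  induction l with
  | nil => simp
  | cons x xs ih =>
    by_cases hp : p x = true <;> simp [hp, ih] <;> ring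

-- splitting a sum of a map along a predicate
theorem pv_sum_map_split (l : List String) (p : String → Bool) (g : String → Int) :
    (l.map g).sum = ((l.filter p).map g).sum + ((l.filter (fun k => !(p k))).map g).sum := by
  induction l with
  | nil => simp
  | cons x xs ih =>
    by_cases hp : p x = true <;> simp [hp, ih] <;> ring

-- pointwise max(a,b) - a = b - min(a,b), summed
theorem pv_sum_max_min (l : List String) (g1 g2 : String → Int) :
    (l.map (fun k => max (g1 k) (g2 k) - g1 k)).sum
      = (l.map g2).sum - (l.map (fun k => min (g1 k) (g2 k))).sum := by
  induction l with
  | nil => simp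
  | cons x xs ih =>
    simp only [List.map_cons, List.sum_cons, ih]
    rcases le_total (g1 x) (g2 x) with h | h
    · rw [max_eq_right h, min_eq_left h]; ring
    · rw [max_eq_left h, min_eq_right h]; ring

-- the two intersection orders are permutations of each other (both nodup, same members)
theorem pv_filter_perm (l1 l2 : List String) (h1 : l1.Nodup) (h2 : l2.Nodup) :
    (l1.filter (fun k => l2.contains k)).Perm (l2.filter (fun k => l1.contains k)) := by
  rw [List.perm_ext_iff_of_nodup (h1.filter _) (h2.filter _)]
  intro a
  simp [List.mem_filter]
  tauto

theorem plus_AB_eq (A B : List (String × Int)) : plus_AB A B = plus_AB_alt A B := by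
  unfold plus_AB plus_AB_alt
  simp only []
  set dA := PySem.Dict.ofList A with hdA
  set dB := PySem.Dict.ofList B with hdB
  have h1 : dA.keys.Nodup := PySem.Dict.nodup_keys_ofList A
  have h2 : dB.keys.Nodup := PySem.Dict.nodup_keys_ofList B
  set l1 := dA.keys
  set l2 := dB.keys
  have hofl1 : PySem.Set.ofList l1 = l1 := PySem.Set.ofList_eq_self_of_nodup l1 h1
  have hofl2 : PySem.Set.ofList l2 = l2 := PySem.Set.ofList_eq_self_of_nodup l2 h2
  have hv1 : dA.values = l1.map (fun k => dA.getD k 0) := PySem.Dict.values_eq_map_keys dA h1 0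
  have hv2 : dB.values = l2.map (fun k => dB.getD k 0) := PySem.Dict.values_eq_map_keys dB h2 0
  -- the union list is l1 followed by the new elements of l2
  have hunion : PySem.Set.union (PySem.Set.ofList l1) (PySem.Set.ofList l2)
      = l1 ++ l2.filter (fun k => !(l1.contains k)) := by
    rw [hofl1]
    show PySem.Set.update l1 (PySem.Set.ofList l2) = _
    rw [PySem.Set.update_eq_append_filter, hofl2, hofl2]
    simp [PySem.Set.contains_eq_listContains]
  -- the intersection list, in l1's order
  have hinter : PySem.Set.inter (PySem.Set.ofList l1) l2 = l1.filter (fun k => l2.contains k) := by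
    rw [hofl1]
    show List.filter _ l1 = _
    apply List.filter_congr
    intro x _
    simp [PySem.Set.contains]
  rw [hunion, hinter, hv1, hv2, pv_foldl_ite]
  simp only [zero_add, List.map_append, List.sum_append]
  have hcontains : ∀ (l : List String) (x : String), l.Nodup →
      PySem.Set.contains (PySem.Set.ofList l) x = l.contains x := by
    intro l x hn
    rw [PySem.Set.ofList_eq_self_of_nodup l hn]
    simp [PySem.Set.contains]
  -- on l1 the first guard reduces to membership in l2
  have hbranch1 : (l1.map (fun e =>
        if PySem.Set.contains (PySem.Set.ofList l1) e && PySem.Set.contains (PySem.Set.ofList l2) e then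
          max (dA.getD e 0) (dB.getD e 0)
        else if PySem.Set.contains (PySem.Set.ofList l1) e then dA.getD e 0 else dB.getD e 0)).sum
      = (l1.map (fun k => if l2.contains k then max (dA.getD k 0) (dB.getD k 0) else dA.getD k 0)).sum := by
    congr 1
    apply List.map_congr_left
    intro x hx
    rw [hcontains l1 x h1, hcontains l2 x h2]
    simp [hx]
  -- on the new part of l2 only the last branch fires
  have hbranch2 : ((l2.filter (fun k => !(l1.contains k))).map (fun e =>
        if PySem.Set.contains (PySem.Set.ofList l1) e && PySem.Set.contains (PySem.Set.ofList l2) e then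
          max (dA.getD e 0) (dB.getD e 0)
        else if PySem.Set.contains (PySem.Set.ofList l1) e then dA.getD e 0 else dB.getD e 0)).sum
      = ((l2.filter (fun k => !(l1.contains k))).map (fun k => dB.getD k 0)).sum := by
    congr 1
    apply List.map_congr_left
    intro x hx
    rw [List.mem_filter] at hx
    rw [hcontains l1 x h1, hcontains l2 x h2]
    have hn : x ∉ l1 := by simpa using hx.2
    simp [hn]
  rw [hbranch1, hbranch2]
  rw [pv_sum_map_ite l1 (fun k => l2.contains k) (fun k => dA.getD k 0)
        (fun k => max (dA.getD k 0) (dB.getD k 0))]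
  have hperm : ((l1.filter (fun k => l2.contains k)).map (fun k => dB.getD k 0)).sum
      = ((l2.filter (fun k => l1.contains k)).map (fun k => dB.getD k 0)).sum :=
    ((pv_filter_perm l1 l2 h1 h2).map (fun k => dB.getD k 0)).sum_eq
  rw [pv_sum_max_min (l1.filter (fun k => l2.contains k)) (fun k => dA.getD k 0) (fun k => dB.getD k 0),
      hperm, pv_sum_map_split l2 (fun k => l1.contains k) (fun k => dB.getD k 0)]
  ring

-- ===== VERDICT (by name: the statement is the Claim_ definition above) =====
theorem plus_AB_spec : Claim_equal_plus_AB := by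
  intro A B _
  exact plus_AB_eq A B
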